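-- pv_equiv track=rewrite | github.com/Seregawpn/Nexy_server | server/modules/grpc_service/core/grpc_server.py | _merge_chunk_text
-- ===== SOURCE A (Python) =====
-- def _merge_chunk_text(existing: str, incoming: str) -> str:
--     """Merge collect chunks into one canonical prompt.
--
--     Supports both chunk semantics:
--     - full snapshot chunks (incoming startswith existing);
--     - delta chunks (append with suffix/prefix overlap dedup).
--     """
--     existing = existing or ""
--     incoming = incoming or ""
--
--     if incoming == "":
--         return existing
--     if existing == "":
--         return incoming
--     if incoming == existing:
--         return existing
--
--     # Snapshot growth path: new chunk already contains full previous text.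
--     if incoming.startswith(existing):
--         return incoming
--     if existing.startswith(incoming):
--         return existing
--     if incoming in existing:
--         return existing
--     if existing in incoming:
--         return incoming
--
--     # Delta path: append only non-overlapping tail.
--     max_overlap = min(len(existing), len(incoming))
--     overlap = 0
--     for i in range(max_overlap, 0, -1):
--         if existing.endswith(incoming[:i]):
--             overlap = i
--             break
--     return existing + incoming[overlap:]
-- ===== SOURCE B (Python) =====
-- def _fall(p, pi, k, c):
--     """KMP failure-link fallback: follow pi until p[k] can extend with c (or k = 0)."""
--     m = len(p)
--     while k > 0 and (k == m or p[k] != c):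
--         k = pi[k - 1]
--     return k
--
--
-- def _merge_chunk_text(existing: str, incoming: str) -> str:
--     existing = existing or ""
--     incoming = incoming or ""
--
--     if not incoming:
--         return existing
--     if not existing:
--         return incoming
--
--     # Containment (covers equality and both snapshot/prefix cases): keep the superstring.
--     if incoming in existing:
--         return existing
--     if existing in incoming:
--         return incoming
--
--     # Delta path: KMP prefix-function of incoming, then run its automaton over
--     # existing; the final state is the longest suffix of existing that is a
--     # prefix of incoming.  O(len(existing) + len(incoming)).
--     m = len(incoming)
--     pi = [0] * m
--     k = 0
--     for i in range(1, m):
--         c = incoming[i]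
--         k = _fall(incoming, pi, k, c)
--         if k < m and incoming[k] == c:
--             k += 1
--         pi[i] = k
--     q = 0
--     for c in existing:
--         q = _fall(incoming, pi, q, c)
--         if q < m and incoming[q] == c:
--             q += 1
--     return existing + incoming[q:]
-- ===== Notes on version B (the rewrite author's own statement) =====
-- stated objective: faster
-- what changed: B collapses A's six ordered special cases into two containment checks and replaces A's descending overlap scan (which re-tests existing.endswith(incoming[:i]) for every candidate length i) with a KMP prefix-function automaton run once over existing, computing the longest suffix/prefix overlap in a single linear pass.
import Mathlib
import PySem

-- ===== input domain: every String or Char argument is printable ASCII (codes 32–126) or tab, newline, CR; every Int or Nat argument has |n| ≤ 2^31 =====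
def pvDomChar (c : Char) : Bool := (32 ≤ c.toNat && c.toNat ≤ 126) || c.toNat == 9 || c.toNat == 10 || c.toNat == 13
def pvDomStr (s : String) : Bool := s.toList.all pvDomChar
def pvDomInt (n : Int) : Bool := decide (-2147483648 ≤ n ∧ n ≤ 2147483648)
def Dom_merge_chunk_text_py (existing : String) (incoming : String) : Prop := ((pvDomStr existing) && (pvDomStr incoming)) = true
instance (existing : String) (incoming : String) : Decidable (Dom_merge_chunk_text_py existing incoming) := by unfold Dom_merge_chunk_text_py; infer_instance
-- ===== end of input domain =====

-- B replaces A's six ordered special cases + descending overlap-length scan by two containment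
-- checks and a KMP prefix-function automaton that finds the suffix/prefix overlap in one linear
-- pass (objective: a genuinely different algorithm; return value proved equal on all inputs).


-- ===== PORT A =====
-- A's 'for i in range(max_overlap, 0, -1): if existing.endswith(incoming[:i]): overlap = i; break'
-- (first match wins, 0 if the range is exhausted)
def mergeLoopA (e inc : List Char) : List Int → Int
  | [] => 0
  | i :: rest =>
      if PySem.Chars.endswith e (PySem.Chars.slice inc none (some i)) then i
      else mergeLoopA e inc rest

def merge_chunk_text_py (existing : String) (incoming : String) : String :=
  let e := existing.toList
  let inc := incoming.toList
  if inc = [] then existing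
  else if e = [] then incoming
  else if inc = e then existing
  else if PySem.Chars.startswith inc e then incoming
  else if PySem.Chars.startswith e inc then existing
  else if PySem.Chars.isIn inc e then existing
  else if PySem.Chars.isIn e inc then incoming
  else
    let maxOverlap : Int := min (e.length : Int) (inc.length : Int)
    let overlap := mergeLoopA e inc (PySem.List.pyRange maxOverlap 0 (-1))
    String.ofList (e ++ PySem.Chars.slice inc (some overlap) none)

-- ===== PORT B =====
-- B's '_fall': 'while k > 0 and (k == m or p[k] != c): k = pi[k - 1]'.
-- The Python while is unbounded; here fuel := k at each call site suffices, because the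
-- failure chain strictly decreases (pi[k-1] ≤ k-1 for the pi built below, proved in the lemmas).
def kmpFall (p : List Char) (pi : List Nat) (c : Char) : Nat → Nat → Nat
  | 0, k => k
  | f + 1, k =>
      if k ≠ 0 ∧ (k = p.length ∨ p.getD k ' ' ≠ c) then
        kmpFall p pi c f (pi.getD (k - 1) 0)
      else k

-- one automaton step: fall back, then 'if k < m and p[k] == c: k += 1'
def kmpStep (p : List Char) (pi : List Nat) (k : Nat) (c : Char) : Nat :=
  let k' := kmpFall p pi c k k
  if k' < p.length ∧ p.getD k' ' ' = c then k' + 1 else k'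

-- B's 'pi = [0]*m; k = 0; for i in range(1, m): … ; pi[i] = k'
def kmpBuild (p : List Char) : List Nat :=
  (List.foldl
    (fun st i =>
      let k := kmpStep p st.1 st.2 (p.getD i ' ')
      (st.1.set i k, k))
    (List.replicate p.length 0, 0) (List.range' 1 (p.length - 1))).1

def merge_chunk_text_py_alt (existing : String) (incoming : String) : String :=
  let e := existing.toList
  let inc := incoming.toList
  if inc = [] then existing
  else if e = [] then incoming
  else if PySem.Chars.isIn inc e then existing
  else if PySem.Chars.isIn e inc then incoming
  else
    let pi := kmpBuild inc
    let q := e.foldl (fun q c => kmpStep inc pi q c) 0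
    String.ofList (e ++ PySem.Chars.slice inc (some (q : Int)) none)

-- ===== PRECONDITION & SPEC =====
def Spec_merge_chunk_text_py (existing : String) (incoming : String) (out : String) : Prop := out = merge_chunk_text_py_alt existing incoming
instance (existing : String) (incoming : String) (out : String) : Decidable (Spec_merge_chunk_text_py existing incoming out) := by unfold Spec_merge_chunk_text_py; infer_instance

-- ===== CLAIM (what is proved, stated in full; the proofs are below) =====
def Claim_equal_merge_chunk_text_py : Prop := ∀ (existing : String) (incoming : String), Dom_merge_chunk_text_py existing incoming → Spec_merge_chunk_text_py existing incoming (merge_chunk_text_py existing incoming)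

-- ===== LEMMAS AND PROOFS =====

-- the value A's loop settles on: greatest i ≤ c with p.take i a suffix of t (0 if none)
def bestOv (t p : List Char) : Nat → Nat
  | 0 => 0
  | c + 1 => if p.take (c + 1) <:+ t then c + 1 else bestOv t p c

theorem mergeLoopA_eq_bestOv (e inc : List Char) (c : Nat) :
    mergeLoopA e inc (PySem.List.pyRange (c : Int) 0 (-1)) = (bestOv e inc c : Int) := by
  induction c with
  | zero => simp [PySem.List.pyRange_neg_one_eq_nil, mergeLoopA, bestOv]
  | succ k ih =>
    rw [PySem.List.pyRange_neg_one_cons (by exact_mod_cast Nat.succ_pos k),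
        show ((k + 1 : Nat) : Int) - 1 = (k : Int) by push_cast; ring]
    simp only [mergeLoopA, bestOv, PySem.Chars.slice_eq_listSlice, PySem.List.slice_to_natCast]
    by_cases hP : inc.take (k + 1) <:+ e
    · simp [(PySem.Chars.endswith_iff e (inc.take (k + 1))).mpr hP, hP]
    · have hb : PySem.Chars.endswith e (inc.take (k + 1)) = false := by
        rw [Bool.eq_false_iff]
        intro hc
        exact hP ((PySem.Chars.endswith_iff e (inc.take (k + 1))).mp hc)
      simp [hb, hP, ih]

theorem bestOv_le (t p : List Char) (c : Nat) : bestOv t p c ≤ c := by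
  induction c with
  | zero => simp [bestOv]
  | succ k ih => unfold bestOv; split <;> omega

theorem bestOv_holds (t p : List Char) (c : Nat) : p.take (bestOv t p c) <:+ t := by
  induction c with
  | zero => simp [bestOv]
  | succ k ih => unfold bestOv; split <;> simp_all

theorem le_bestOv (t p : List Char) (c : Nat) (i : Nat) (hic : i ≤ c)
    (hi : p.take i <:+ t) : i ≤ bestOv t p c := by
  induction c with
  | zero => omega
  | succ k ih =>
    unfold bestOv; split
    · omega
    · next hc =>
        rcases Nat.lt_or_ge i (k + 1) with h | h
        · exact ih (by omega)
        · exact absurd (by rwa [show i = k + 1 by omega] at hi) hc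

theorem bestOv_succ (t p : List Char) (c : Nat) :
    bestOv t p (c + 1) = if p.take (c + 1) <:+ t then c + 1 else bestOv t p c := rfl

theorem bestOv_unique (t p : List Char) (B q : Nat)
    (h1 : p.take q <:+ t) (h2 : q ≤ B)
    (h3 : ∀ j, j ≤ B → p.take j <:+ t → j ≤ q) : bestOv t p B = q :=
  le_antisymm (h3 _ (bestOv_le t p B) (bestOv_holds t p B)) (le_bestOv t p B q h2 h1)

-- shorter suffix of a common supersequence is a suffix of the longer one
theorem take_suffix_take (p t : List Char) (j k : Nat)
    (hj : p.take j <:+ t) (hk : p.take k <:+ t) (hjk : j ≤ k) : p.take j <:+ p.take k :=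
  List.suffix_of_suffix_length_le hj hk (by simp; omega)

theorem concat_suffix_concat (l1 l2 : List Char) (a c : Char) :
    (l1 ++ [a]) <:+ (l2 ++ [c]) ↔ a = c ∧ l1 <:+ l2 := by
  rw [← List.reverse_prefix]
  simp [List.cons_prefix_cons, List.reverse_prefix]

theorem take_succ_getD (p : List Char) (j : Nat) (hj : j < p.length) :
    p.take (j + 1) = p.take j ++ [p.getD j ' '] := by
  rw [List.take_add_one]
  simp [List.getElem?_eq_getElem hj, List.getD, Option.toList]

-- extending an overlap by one character
theorem take_succ_suffix_append (p t : List Char) (j : Nat) (c : Char) (hj : j < p.length) :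
    (p.take (j + 1) <:+ t ++ [c]) ↔ (p.getD j ' ' = c ∧ p.take j <:+ t) := by
  rw [take_succ_getD p j hj, concat_suffix_concat]

-- pi[i] is the longest proper border of p.take (i+1), for all i < n
def PiOK (p : List Char) (pi : List Nat) (n : Nat) : Prop :=
  ∀ i, i < n → pi.getD i 0 = bestOv (p.take (i + 1)) p i

theorem kmpFall_spec (p : List Char) (pi : List Nat) (c : Char) (t : List Char) (B : Nat)
    (hpi : PiOK p pi B) :
    ∀ fuel k, k ≤ fuel → k < p.length → k ≤ B → p.take k <:+ t →
    (∀ j, j ≤ B → p.take j <:+ t → j < p.length → p.getD j ' ' = c → j ≤ k) →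
    p.take (kmpFall p pi c fuel k) <:+ t ∧ kmpFall p pi c fuel k ≤ k ∧
    (kmpFall p pi c fuel k = 0 ∨ p.getD (kmpFall p pi c fuel k) ' ' = c) ∧
    (∀ j, j ≤ B → p.take j <:+ t → j < p.length → p.getD j ' ' = c →
      j ≤ kmpFall p pi c fuel k) := by
  intro fuel
  induction fuel with
  | zero =>
    intro k hk hkm hkB hks hmax
    have : k = 0 := by omega
    subst this
    exact ⟨hks, le_refl 0, Or.inl rfl, hmax⟩
  | succ f ih =>
    intro k hk hkm hkB hks hmax
    by_cases hcond : k ≠ 0 ∧ (k = p.length ∨ p.getD k ' ' ≠ c)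
    · have hkc : p.getD k ' ' ≠ c := by
        rcases hcond.2 with h | h
        · omega
        · exact h
      have hk1B : k - 1 < B := by omega
      have hpik : pi.getD (k - 1) 0 = bestOv (p.take k) p (k - 1) := by
        have := hpi (k - 1) hk1B
        rwa [show k - 1 + 1 = k by omega] at this
      rw [kmpFall, if_pos hcond, hpik]
      set k' := bestOv (p.take k) p (k - 1) with hk'
      have hk'le : k' ≤ k - 1 := bestOv_le _ _ _
      have hk's : p.take k' <:+ p.take k := bestOv_holds _ _ _
      have hk'st : p.take k' <:+ t := hk's.trans hks
      have hmax' : ∀ j, j ≤ B → p.take j <:+ t → j < p.length → p.getD j ' ' = c → j ≤ k' := by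
        intro j hjB hjs hjm hjc
        have hjk : j ≤ k := hmax j hjB hjs hjm hjc
        have hjk' : j < k := by
          rcases Nat.eq_or_lt_of_le hjk with h | h
          · exact absurd (h ▸ hjc) hkc
          · exact h
        have : p.take j <:+ p.take k := take_suffix_take p t j k hjs hks hjk
        exact le_bestOv (p.take k) p (k - 1) j (by omega) this
      have := ih k' (by omega) (by omega) (by omega) hk'st hmax'
      exact ⟨this.1, le_trans this.2.1 (by omega), this.2.2⟩
    · rw [kmpFall, if_neg hcond]
      refine ⟨hks, le_refl k, ?_, hmax⟩
      push Not at hcond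
      by_cases hk0 : k = 0
      · exact Or.inl hk0
      · rcases (hcond hk0).imp_left (fun h => h) with ⟨h1, h2⟩
        exact Or.inr (by simpa using h2)

theorem kmpStep_spec (p : List Char) (pi : List Nat) (t : List Char) (B : Nat) (c : Char)
    (hpi : PiOK p pi B) (hB : B + 1 ≤ p.length) (q : Nat) (hq : q = bestOv t p B) :
    kmpStep p pi q c = bestOv (t ++ [c]) p (B + 1) := by
  have hqB : q ≤ B := hq ▸ bestOv_le t p B
  have hqm : q < p.length := by omega
  have hqs : p.take q <:+ t := hq ▸ bestOv_holds t p B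
  have hmax : ∀ j, j ≤ B → p.take j <:+ t → j < p.length → p.getD j ' ' = c → j ≤ q := by
    intro j hjB hjs _ _
    exact hq ▸ le_bestOv t p B j hjB hjs
  obtain ⟨hrs, hrq, hr0c, hrmax⟩ :=
    kmpFall_spec p pi c t B hpi q q (le_refl q) hqm hqB hqs hmax
  unfold kmpStep
  set r := kmpFall p pi c q q with hr
  have hrm : r < p.length := by omega
  by_cases hrc : p.getD r ' ' = c
  · rw [if_pos ⟨hrm, hrc⟩]
    refine (bestOv_unique (t ++ [c]) p (B + 1) (r + 1) ?_ (by omega) ?_).symm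
    · exact (take_succ_suffix_append p t r c hrm).mpr ⟨hrc, hrs⟩
    · intro j hjB hjs
      match j with
      | 0 => omega
      | j' + 1 =>
        have hj'm : j' < p.length := by omega
        obtain ⟨hc', hs'⟩ := (take_succ_suffix_append p t j' c hj'm).mp hjs
        have := hrmax j' (by omega) hs' hj'm hc'
        omega
  · rw [if_neg (by intro h; exact hrc h.2)]
    have hr0 : r = 0 := by
      rcases hr0c with h | h
      · exact h
      · exact absurd h hrc
    refine (bestOv_unique (t ++ [c]) p (B + 1) r ?_ (by omega) ?_).symm
    · rw [hr0]; simp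
    · intro j hjB hjs
      match j with
      | 0 => omega
      | j' + 1 =>
        have hj'm : j' < p.length := by omega
        obtain ⟨hc', hs'⟩ := (take_succ_suffix_append p t j' c hj'm).mp hjs
        have hj'r := hrmax j' (by omega) hs' hj'm hc'
        rw [hr0] at hj'r
        have : j' = 0 := by omega
        rw [this] at hc'
        rw [hr0] at hrc
        exact absurd hc' hrc

theorem buildLoop_inv (p : List Char) :
    ∀ (len i : Nat) (pi : List Nat) (k : Nat),
    1 ≤ i → i + len = p.length →
    pi.length = p.length →
    PiOK p pi i →
    k = bestOv (p.take i) p (i - 1) →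
    PiOK p (List.foldl
      (fun st j =>
        let k' := kmpStep p st.1 st.2 (p.getD j ' ')
        (st.1.set j k', k'))
      (pi, k) (List.range' i len)).1 p.length := by
  intro len
  induction len with
  | zero =>
    intro i pi k hi hlen hplen hpiok hk
    simpa using (by omega : i = p.length) ▸ hpiok
  | succ f ih =>
    intro i pi k hi hlen hplen hpiok hk
    rw [List.range'_succ, List.foldl_cons]
    have him : i < p.length := by omega
    have hstep : kmpStep p pi k (p.getD i ' ') = bestOv (p.take (i + 1)) p i := by
      have hpi' : PiOK p pi (i - 1) := fun j hj => hpiok j (by omega)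
      have := kmpStep_spec p pi (p.take i) (i - 1) (p.getD i ' ') hpi' (by omega) k hk
      rw [show i - 1 + 1 = i by omega] at this
      rw [this, take_succ_getD p i him]
    set k' := kmpStep p pi k (p.getD i ' ') with hk'def
    have hset : PiOK p (pi.set i k') (i + 1) := by
      intro j hj
      rcases Nat.lt_or_ge j i with hji | hji
      · rw [List.getD, List.getElem?_set_ne (by omega)]
        exact hpiok j hji
      · have : j = i := by omega
        subst this
        rw [List.getD, List.getElem?_set_self (by omega)]
        simpa using hstep
    exact ih (i + 1) (pi.set i k') k' (by omega) (by omega) (by simpa using hplen)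
      hset (by simpa using hstep)

theorem kmpBuild_ok (p : List Char) :
    PiOK p (kmpBuild p) p.length := by
  unfold kmpBuild
  rcases Nat.eq_zero_or_pos p.length with h0 | hpos
  · intro j hj; omega
  · exact buildLoop_inv p (p.length - 1) 1 (List.replicate p.length 0) 0
      (le_refl 1) (by omega) (by simp)
      (by
        intro j hj
        have : j = 0 := by omega
        subst this
        simp [bestOv])
      (by simp [bestOv])

-- with no full occurrence, the cap on the candidate overlap length is immaterial
theorem bestOv_cap (t p : List Char) (hns : ¬ p <:+ t) :
    ∀ C, min t.length p.length ≤ C → bestOv t p C = bestOv t p (min t.length p.length) := by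
  intro C
  induction C with
  | zero => intro h; rw [Nat.le_zero.mp h]
  | succ k ih =>
    intro h
    rcases Nat.eq_or_lt_of_le h with heq | hlt
    · rw [heq]
    · have hnot : ¬ p.take (k + 1) <:+ t := by
        intro hs
        rcases Nat.lt_or_ge (k + 1) p.length with hm | hm
        · have := hs.length_le
          rw [List.length_take] at this
          omega
        · exact hns (by rwa [List.take_of_length_le hm] at hs)
      rw [bestOv_succ, if_neg hnot]
      exact ih (by omega)

theorem bestOv_nil (p : List Char) (hp : p ≠ []) : ∀ C, bestOv [] p C = 0 := by
  intro C
  induction C with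
  | zero => rfl
  | succ k ih =>
    rw [bestOv_succ, if_neg, ih]
    intro hs
    have := List.eq_nil_of_suffix_nil hs
    rw [List.take_eq_nil_iff] at this
    rcases this with h | h
    · omega
    · exact hp h

theorem searchFold (p : List Char) (pi : List Nat) (hm : 1 ≤ p.length)
    (hpi : PiOK p pi (p.length - 1)) :
    ∀ (rest t : List Char) (q : Nat), ¬ p <:+: (t ++ rest) → q = bestOv t p p.length →
    List.foldl (fun q c => kmpStep p pi q c) q rest = bestOv (t ++ rest) p p.length := by
  intro rest
  induction rest with
  | nil =>
    intro t q hni hq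
    simpa using hq
  | cons c rest' ih =>
    intro t q hni hq
    have hns : ¬ p <:+ t := by
      intro h
      exact hni (h.isInfix.trans (List.prefix_append t (c :: rest')).isInfix)
    have hq' : q = bestOv t p (p.length - 1) := by
      rw [hq, show p.length = p.length - 1 + 1 by omega, bestOv_succ,
        if_neg (by rwa [show p.length - 1 + 1 = p.length by omega, List.take_length]),
        show p.length - 1 + 1 - 1 = p.length - 1 by omega]
    rw [List.foldl_cons,
      kmpStep_spec p pi t (p.length - 1) c hpi (by omega) q hq',
      show p.length - 1 + 1 = p.length by omega]
    have := ih (t ++ [c]) (bestOv (t ++ [c]) p p.length)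
      (by rwa [List.append_assoc, List.singleton_append]) rfl
    rwa [List.append_assoc, List.singleton_append] at this

theorem extra_main (existing incoming : String) :
    merge_chunk_text_py existing incoming = merge_chunk_text_py_alt existing incoming := by
  unfold merge_chunk_text_py merge_chunk_text_py_alt
  set e := existing.toList with he
  set inc := incoming.toList with hinc
  by_cases h1 : inc = []
  · simp [h1]
  by_cases h2 : e = []
  · simp [h1, h2]
  simp only [if_neg h1, if_neg h2]
  by_cases heq : inc = e
  · have hb : PySem.Chars.isIn inc e = true :=
      (PySem.Chars.isIn_iff_infix inc e).mpr (heq ▸ List.infix_refl inc)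
    rw [if_pos heq, if_pos hb]
  by_cases hs1 : e <+: inc
  · have hnI1 : ¬ PySem.Chars.isIn inc e = true := by
      intro hc
      have hinf := (PySem.Chars.isIn_iff_infix inc e).mp hc
      exact heq (hs1.eq_of_length (le_antisymm hs1.length_le hinf.length_le)).symm
    have hbS : PySem.Chars.startswith inc e = true := (PySem.Chars.startswith_iff inc e).mpr hs1
    have hbI2 : PySem.Chars.isIn e inc = true := (PySem.Chars.isIn_iff_infix e inc).mpr hs1.isInfix
    rw [if_neg heq, if_pos hbS, if_neg hnI1, if_pos hbI2]
  have hnS1 : ¬ PySem.Chars.startswith inc e = true := fun hc =>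
    hs1 ((PySem.Chars.startswith_iff inc e).mp hc)
  by_cases hs2 : inc <+: e
  · have hbI1 : PySem.Chars.isIn inc e = true := (PySem.Chars.isIn_iff_infix inc e).mpr hs2.isInfix
    have hbS2 : PySem.Chars.startswith e inc = true := (PySem.Chars.startswith_iff e inc).mpr hs2
    rw [if_neg heq, if_neg hnS1, if_pos hbS2, if_pos hbI1]
  have hnS2 : ¬ PySem.Chars.startswith e inc = true := fun hc =>
    hs2 ((PySem.Chars.startswith_iff e inc).mp hc)
  by_cases hI1 : PySem.Chars.isIn inc e = true
  · rw [if_neg heq, if_neg hnS1, if_neg hnS2, if_pos hI1, if_pos hI1]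
  by_cases hI2 : PySem.Chars.isIn e inc = true
  · rw [if_neg heq, if_neg hnS1, if_neg hnS2, if_neg hI1, if_pos hI2, if_neg hI1, if_pos hI2]
  rw [if_neg heq, if_neg hnS1, if_neg hnS2, if_neg hI1, if_neg hI2, if_neg hI1, if_neg hI2]
  -- delta path on both sides
  have hm1 : 1 ≤ inc.length := by
    have := List.length_pos_of_ne_nil h1
    omega
  have hniE : ¬ inc <:+: e := by
    intro hc
    exact hI1 ((PySem.Chars.isIn_iff_infix inc e).mpr hc)
  have hnsE : ¬ inc <:+ e := fun hc => hniE hc.isInfix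
  -- B's automaton computes bestOv e inc inc.length
  have hfold : List.foldl (fun q c => kmpStep inc (kmpBuild inc) q c) 0 e
      = bestOv e inc inc.length := by
    have := searchFold inc (kmpBuild inc) hm1
      (fun j hj => kmpBuild_ok inc j (by omega)) e [] 0
      (by simpa using hniE) (by rw [bestOv_nil inc h1])
    simpa using this
  -- A's descending loop computes the same capped maximum
  have hmin : min (e.length : Int) (inc.length : Int) = ((min e.length inc.length : Nat) : Int) := by
    push_cast; rfl
  rw [hmin, mergeLoopA_eq_bestOv, hfold,
    bestOv_cap e inc hnsE inc.length (by omega)]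

-- ===== VERDICT (by name: the statement is the Claim_ definition above) =====
theorem merge_chunk_text_py_spec : Claim_equal_merge_chunk_text_py := by
  intro existing incoming _
  exact extra_main existing incoming
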